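-- pv_equiv track=rewrite | github.com/tresor-del/Algorithmes | piles/manipulation de pile/implementation_en_code.py | deplacer_piles
-- ===== SOURCE A (Python) =====
-- def deplacer_piles(P1):
--     """
--     Déplace les éléments de P1 dans P2 de sorte que :
--       - pairs en haut (ordre conservé)
--       - impairs en bas (ordre inversé)
--     En utilisant une pile intermédiaire P3.
--     Retourne P2 et restaure P1.
--     """
--     P2 = []   # résultat final
--     P3 = []   # pour stocker les pairs
--     sauvegarde = []  # pour restaurer P1 à la fin
--
--     # Étape 1 : vider P1
--     while P1:
--         x = P1.pop()
--         sauvegarde.append(x)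
--         if x % 2 == 0:     # pair
--             P3.append(x)
--         else:              # impair
--             P2.append(x)
--
--     # Étape 2 : restaurer P1
--     while sauvegarde:
--         P1.append(sauvegarde.pop())
--
--     # Étape 3 : transférer pairs de P3 vers P2
--     while P3:
--         P2.append(P3.pop())
--
--     return P2
-- ===== SOURCE B (Python) =====
-- def deplacer_piles(P1):
--     """Odds of P1 reversed, followed by evens of P1 in original order.
--     A restores P1, so B simply leaves P1 untouched (no observable mutation)."""
--     return [x for x in reversed(P1) if x % 2 != 0] + [x for x in P1 if x % 2 == 0]
-- ===== Notes on version B (the rewrite author's own statement) =====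
-- stated objective: simpler
-- what changed: Replaced the three auxiliary stacks and pop-loops with two filter passes: odds of P1 reversed concatenated with evens in original order; P1 is never mutated (A restores it anyway).
import Mathlib
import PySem

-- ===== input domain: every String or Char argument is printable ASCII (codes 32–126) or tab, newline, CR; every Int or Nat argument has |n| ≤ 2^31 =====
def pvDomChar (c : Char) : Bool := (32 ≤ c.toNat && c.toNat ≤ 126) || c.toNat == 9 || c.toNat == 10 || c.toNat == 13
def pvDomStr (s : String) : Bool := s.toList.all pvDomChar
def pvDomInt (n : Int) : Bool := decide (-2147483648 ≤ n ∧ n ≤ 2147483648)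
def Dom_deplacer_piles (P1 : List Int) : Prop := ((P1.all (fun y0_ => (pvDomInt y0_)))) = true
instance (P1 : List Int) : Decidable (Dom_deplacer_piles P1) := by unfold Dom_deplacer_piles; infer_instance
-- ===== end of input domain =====

-- ===== PORT A =====
-- B replaces the three auxiliary stacks with two filters; P1 is restored by A, so B leaves it untouched (return value equivalence).
-- Step 1: while P1: x = P1.pop(); sauvegarde.append(x); evens to P3, odds to P2.
-- Popping from the end = folding over P1.reverse with state (P2, P3, sauvegarde).
-- x % 2 == 0 (Python's mod; for the divisor 2 it agrees with PySem.Int.mod)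
def deplacer_piles_even (x : Int) : Bool := PySem.Int.mod x 2 == 0

def deplacer_piles_step (st : List Int × List Int × List Int) (x : Int) :
    List Int × List Int × List Int :=
  if deplacer_piles_even x then (st.1, st.2.1 ++ [x], st.2.2 ++ [x])
  else (st.1 ++ [x], st.2.1, st.2.2 ++ [x])

def deplacer_piles (P1 : List Int) : List Int :=
  let st := P1.reverse.foldl deplacer_piles_step ([], [], [])
  -- Step 2 restores P1 (mutation only; no effect on the return value).
  -- Step 3: while P3: P2.append(P3.pop())
  st.1 ++ st.2.1.reverse

-- ===== PORT B =====
def deplacer_piles_alt (P1 : List Int) : List Int :=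
  P1.reverse.filter (fun x => !deplacer_piles_even x) ++
  P1.filter (fun x => deplacer_piles_even x)

-- ===== PRECONDITION & SPEC =====
def Spec_deplacer_piles (P1 : List Int) (out : List Int) : Prop := out = deplacer_piles_alt P1
instance (P1 : List Int) (out : List Int) : Decidable (Spec_deplacer_piles P1 out) := by unfold Spec_deplacer_piles; infer_instance

-- ===== CLAIM (what is proved, stated in full; the proofs are below) =====
def Claim_equal_deplacer_piles : Prop := ∀ (P1 : List Int), Dom_deplacer_piles P1 → Spec_deplacer_piles P1 (deplacer_piles P1)

-- ===== LEMMAS AND PROOFS =====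

theorem deplacer_piles_foldl (l P2 P3 sv : List Int) :
    l.foldl deplacer_piles_step (P2, P3, sv) =
      (P2 ++ l.filter (fun x => !deplacer_piles_even x),
       P3 ++ l.filter (fun x => deplacer_piles_even x),
       sv ++ l) := by
  induction l generalizing P2 P3 sv with
  | nil => simp
  | cons x xs ih =>
    simp only [List.foldl_cons, deplacer_piles_step, List.filter_cons]
    by_cases h : deplacer_piles_even x = true <;>
      simp only [h, Bool.not_true, Bool.not_false, if_true, if_false, ih,
        Bool.false_eq_true] <;> simp

-- ===== VERDICT (by name: the statement is the Claim_ definition above) =====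
theorem deplacer_piles_spec : Claim_equal_deplacer_piles := by
  intro P1 _
  unfold Spec_deplacer_piles deplacer_piles deplacer_piles_alt
  rw [deplacer_piles_foldl]
  simp [List.filter_reverse]
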